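-- pv_equiv track=rewrite | github.com/SzymonIwaniuk/wdi-2024-2025 | Zestaw3/zad115.py | wspolne
-- ===== SOURCE A (Python) =====
-- def wspolne(a, b):
--     flag = 0
--     i = 2
--     while a > 1 or b > 1:
--         if a % i == 0 and b % i == 0:
--             flag += 1
--
--         while a % i == 0:
--             a //= i
--
--         while b % i == 0:
--             b //= i
--
--         i += 1
--     if flag == 1: return True
--     else: return False
-- ===== SOURCE B (Python) =====
-- # B: factor each number by trial division to sqrt and compare prime-factor sets,
-- # instead of A's synchronized division scan up to the largest prime factor.
-- def wspolne(a, b):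
--     if a <= 1 and b <= 1:
--         return False
--     return len(_prime_factors(abs(a)) & _prime_factors(abs(b))) == 1
--
-- def _prime_factors(n):
--     fs = set()
--     d = 2
--     while d * d <= n:
--         if n % d == 0:
--             fs.add(d)
--             while n % d == 0:
--                 n //= d
--         else:
--             d += 1
--     if n > 1:
--         fs.add(n)
--     return fs
-- ===== Notes on version B (the rewrite author's own statement) =====
-- stated objective: faster
-- what changed: A scans candidate divisors 2,3,4,... in one synchronized loop until both numbers are reduced to 1 (up to the largest prime factor, O(max(a,b)) in the worst case); B factorizes each argument independently by trial division up to its square root and compares the sizes of the two prime-factor sets.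
import Mathlib
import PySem

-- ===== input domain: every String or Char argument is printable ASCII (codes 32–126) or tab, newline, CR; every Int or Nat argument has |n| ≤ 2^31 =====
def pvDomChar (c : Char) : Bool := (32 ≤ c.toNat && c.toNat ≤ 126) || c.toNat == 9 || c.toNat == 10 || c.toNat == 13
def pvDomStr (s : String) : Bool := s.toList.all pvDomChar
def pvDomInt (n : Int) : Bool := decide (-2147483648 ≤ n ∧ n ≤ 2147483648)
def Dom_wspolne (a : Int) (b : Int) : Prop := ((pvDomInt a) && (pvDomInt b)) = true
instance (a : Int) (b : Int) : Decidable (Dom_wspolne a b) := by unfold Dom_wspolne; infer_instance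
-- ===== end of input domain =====

-- B replaces A's synchronized trial-division scan (up to the largest prime factor) by
-- factoring each argument separately up to its square root and intersecting the two
-- prime-factor sets; objective: faster.

-- exact division by a divisor 2 ≤ i shrinks the absolute value (termination measure of the strip loops)
theorem pvStripDec (a i : Int) (hi : 2 ≤ i) (hd : i ∣ a) (ha : a ≠ 0) :
    (PySem.Int.floordiv a i).natAbs < a.natAbs := by
  rw [PySem.Int.floordiv_eq_ediv_of_pos (by omega)]
  obtain ⟨k, rfl⟩ := hd
  rw [Int.mul_ediv_cancel_left _ (by omega), Int.natAbs_mul]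
  have hk : k.natAbs ≠ 0 := by
    intro h
    exact ha (by simp [Int.natAbs_eq_zero.mp h])
  have h2 : 2 ≤ i.natAbs := by omega
  calc k.natAbs < 2 * k.natAbs := by omega
    _ ≤ i.natAbs * k.natAbs := Nat.mul_le_mul_right _ h2

-- ===== PORT A =====
-- inner loop `while a % i == 0: a //= i`  (the `2 ≤ i ∧ a ≠ 0` conjuncts are totality guards:
-- i is always ≥ 2 here, and on a = 0 the Python loop does not terminate — excluded by Pre_)
def stripA (a i : Int) : Int :=
  if h : PySem.Int.mod a i = 0 ∧ 2 ≤ i ∧ a ≠ 0 then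
    stripA (PySem.Int.floordiv a i) i
  else a
termination_by a.natAbs
decreasing_by
  exact pvStripDec a i h.2.1 (PySem.Int.mod_eq_zero_iff_dvd a i |>.mp h.1) h.2.2

-- outer loop `while a > 1 or b > 1: …` ; fuel is a totality guard only (the loop runs at most
-- max(a,b) iterations whenever it terminates, and wspolne supplies that much fuel)
def loopA : Nat → Int → Int → Int → Int → Bool
  | 0, _, _, _, flag => flag == 1
  | fuel + 1, a, b, i, flag =>
    if 1 < a ∨ 1 < b then
      loopA fuel (stripA a i) (stripA b i) (i + 1)
        (if PySem.Int.mod a i = 0 ∧ PySem.Int.mod b i = 0 then flag + 1 else flag)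
    else flag == 1

def wspolne (a : Int) (b : Int) : Bool :=
  loopA (a.natAbs + b.natAbs + 2) a b 2 0

-- ===== PORT B =====
-- inner loop `while n % d == 0: n //= d` of _prime_factors (same totality guards as stripA)
def stripB (n d : Int) : Int :=
  if h : PySem.Int.mod n d = 0 ∧ 2 ≤ d ∧ n ≠ 0 then
    stripB (PySem.Int.floordiv n d) d
  else n
termination_by n.natAbs
decreasing_by
  exact pvStripDec n d h.2.1 (PySem.Int.mod_eq_zero_iff_dvd n d |>.mp h.1) h.2.2

-- the strip loop never grows the absolute value (cited by trialB's termination proof)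
theorem stripB_natAbs_le (n d : Int) : (stripB n d).natAbs ≤ n.natAbs := by
  induction n using stripB.induct d with
  | case1 n h ih =>
    rw [stripB, dif_pos h]
    exact le_trans ih (le_of_lt (pvStripDec n d h.2.1 ((PySem.Int.mod_eq_zero_iff_dvd n d).mp h.1) h.2.2))
  | case2 n h => rw [stripB, dif_neg h]

-- `while d * d <= n: ...` of _prime_factors (the `2 ≤ d` conjunct is a totality guard; d starts at 2)
def trialB (n d : Int) (fs : PySem.Set Int) : PySem.Set Int :=
  if h : d * d ≤ n ∧ 2 ≤ d then
    if hm : PySem.Int.mod n d = 0 then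
      trialB (stripB n d) d (PySem.Set.add fs d)
    else
      trialB n (d + 1) fs
  else
    if 1 < n then PySem.Set.add fs n else fs
termination_by (2 * n - d).toNat
decreasing_by
  · have hdvd : d ∣ n := (PySem.Int.mod_eq_zero_iff_dvd n d).mp hm
    have hn4 : 4 ≤ n := le_trans (by nlinarith [h.2] : (4:Int) ≤ d * d) h.1
    have hdn : d ≤ n := le_trans (by nlinarith [h.2] : d ≤ d * d) h.1
    have hlt : (stripB n d).natAbs < n.natAbs := by
      rw [stripB, dif_pos ⟨hm, h.2, by omega⟩]
      exact lt_of_le_of_lt (stripB_natAbs_le _ _)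
        (pvStripDec n d h.2 hdvd (by omega))
    omega
  · have hn4 : 4 ≤ n := le_trans (by nlinarith [h.2] : (4:Int) ≤ d * d) h.1
    have hdn : d ≤ n := le_trans (by nlinarith [h.2] : d ≤ d * d) h.1
    omega

def wspolne_alt (a : Int) (b : Int) : Bool :=
  if a ≤ 1 ∧ b ≤ 1 then false
  else
    PySem.Set.len
      (PySem.Set.inter (trialB |a| 2 PySem.Set.empty) (trialB |b| 2 PySem.Set.empty)) == 1

-- ===== PRECONDITION & SPEC =====
-- Pre_ excludes only the inputs on which A never returns: a = 0 with b > 1 (or symmetrically),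
-- where A's inner `while a % i == 0: a //= i` loops forever on 0.
def Pre_wspolne (a : Int) (b : Int) : Prop := (a = 0 → b ≤ 1) ∧ (b = 0 → a ≤ 1)
instance (a : Int) (b : Int) : Decidable (Pre_wspolne a b) := by unfold Pre_wspolne; infer_instance

def pvWitness_wspolne : Int × Int := (6, 4)

def Spec_wspolne (a : Int) (b : Int) (out : Bool) : Prop := out = wspolne_alt a b
instance (a : Int) (b : Int) (out : Bool) : Decidable (Spec_wspolne a b out) := by unfold Spec_wspolne; infer_instance

-- ===== CLAIM (what is proved, stated in full; the proofs are below) =====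
def Claim_equal_wspolne : Prop := ∀ (a : Int) (b : Int), Dom_wspolne a b → Pre_wspolne a b → Spec_wspolne a b (wspolne a b)

-- ===== LEMMAS AND PROOFS =====

-- prime factors of an integer, as a finset of naturals
def PF (n : Int) : Finset ℕ := n.natAbs.primeFactors

theorem pf_mem (n : Int) (p : ℕ) : p ∈ PF n ↔ p.Prime ∧ (p : Int) ∣ n ∧ n ≠ 0 := by
  unfold PF
  rw [Nat.mem_primeFactors, Int.ofNat_dvd_left]
  simp [Int.natAbs_eq_zero]

theorem stripB_eq_stripA (n d : Int) : stripB n d = stripA n d := by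
  induction n using stripB.induct d with
  | case1 n h ih => rw [stripB, stripA, dif_pos h, dif_pos h, ih]
  | case2 n h => rw [stripB, stripA, dif_neg h, dif_neg h]

theorem stripA_dvd (a i : Int) : stripA a i ∣ a := by
  induction a using stripA.induct i with
  | case1 a h ih =>
    rw [stripA, dif_pos h]
    refine dvd_trans ih ?_
    obtain ⟨k, rfl⟩ := (PySem.Int.mod_eq_zero_iff_dvd _ i).mp h.1
    rw [PySem.Int.floordiv_eq_ediv_of_pos (by omega), Int.mul_ediv_cancel_left _ (by omega)]
    exact dvd_mul_left k i
  | case2 a h => rw [stripA, dif_neg h]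

theorem stripA_ne_zero (a i : Int) (ha : a ≠ 0) : stripA a i ≠ 0 := by
  induction a using stripA.induct i with
  | case1 a h ih =>
    rw [stripA, dif_pos h]
    apply ih
    obtain ⟨k, rfl⟩ := (PySem.Int.mod_eq_zero_iff_dvd _ i).mp h.1
    rw [PySem.Int.floordiv_eq_ediv_of_pos (by omega), Int.mul_ediv_cancel_left _ (by omega)]
    intro hk; exact ha (by rw [hk, mul_zero])
  | case2 a h => rw [stripA, dif_neg h]; exact ha

theorem stripA_pos (a i : Int) (ha : 0 < a) : 0 < stripA a i := by
  induction a using stripA.induct i with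
  | case1 a h ih =>
    rw [stripA, dif_pos h]
    apply ih
    obtain ⟨k, rfl⟩ := (PySem.Int.mod_eq_zero_iff_dvd _ i).mp h.1
    rw [PySem.Int.floordiv_eq_ediv_of_pos (by omega), Int.mul_ediv_cancel_left _ (by omega)]
    nlinarith [h.2.1, ha]
  | case2 a h => rw [stripA, dif_neg h]; exact ha

theorem stripA_neg (a i : Int) (hi : 2 ≤ i) (ha : a < 0) : stripA a i < 0 := by
  induction a using stripA.induct i with
  | case1 a h ih =>
    rw [stripA, dif_pos h]
    apply ih
    obtain ⟨k, rfl⟩ := (PySem.Int.mod_eq_zero_iff_dvd _ i).mp h.1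
    rw [PySem.Int.floordiv_eq_ediv_of_pos (by omega), Int.mul_ediv_cancel_left _ (by omega)]
    nlinarith [h.2.1, ha]
  | case2 a h => rw [stripA, dif_neg h]; exact ha

theorem stripA_not_dvd (a i : Int) (ha : a ≠ 0) (hi : 2 ≤ i) : ¬ i ∣ stripA a i := by
  induction a using stripA.induct i with
  | case1 a h ih =>
    rw [stripA, dif_pos h]
    apply ih
    obtain ⟨k, rfl⟩ := (PySem.Int.mod_eq_zero_iff_dvd _ i).mp h.1
    rw [PySem.Int.floordiv_eq_ediv_of_pos (by omega), Int.mul_ediv_cancel_left _ (by omega)]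
    intro hk; exact ha (by rw [hk, mul_zero])
  | case2 a h =>
    rw [stripA, dif_neg h]
    intro hdvd
    exact h ⟨(PySem.Int.mod_eq_zero_iff_dvd a i).mpr hdvd, hi, ha⟩

theorem stripA_of_not_dvd (a i : Int) (h : ¬ i ∣ a) : stripA a i = a := by
  rw [stripA, dif_neg]
  intro hc
  exact h ((PySem.Int.mod_eq_zero_iff_dvd a i).mp hc.1)

theorem stripA_pf (a i : Int) (p : ℕ) (hip : i = (p : Int)) (hp : p.Prime) (ha : a ≠ 0) :
    PF (stripA a i) = PF a \ {p} := by
  induction a using stripA.induct i with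
  | case1 a h ih =>
    rw [stripA, dif_pos h]
    obtain ⟨k, hk⟩ := (PySem.Int.mod_eq_zero_iff_dvd _ i).mp h.1
    have hfd : PySem.Int.floordiv a i = k := by
      rw [hk, PySem.Int.floordiv_eq_ediv_of_pos (by omega), Int.mul_ediv_cancel_left _ (by omega)]
    have hk0 : k ≠ 0 := by rintro rfl; exact ha (by rw [hk, mul_zero])
    rw [ih (by rw [hfd]; exact hk0)]
    have hmem : ∀ q : ℕ, q ≠ p → (q ∈ PF (PySem.Int.floordiv a i) ↔ q ∈ PF a) := by
      intro q hqp
      rw [hfd, pf_mem, pf_mem]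
      constructor
      · rintro ⟨hq, hdvd, -⟩
        exact ⟨hq, by rw [hk]; exact Dvd.dvd.mul_left hdvd i, ha⟩
      · rintro ⟨hq, hdvd, -⟩
        refine ⟨hq, ?_, hk0⟩
        rw [hk, hip] at hdvd
        have hqz : Prime ((q : ℤ)) := Nat.prime_iff_prime_int.mp hq
        rcases hqz.dvd_mul.mp hdvd with hcase | hcase
        · exact absurd ((Nat.prime_dvd_prime_iff_eq hq hp).mp (Int.natCast_dvd_natCast.mp hcase)) hqp
        · exact hcase
    ext q
    by_cases hqp : q = p
    · simp [hqp]
    · simp [Finset.mem_sdiff, hqp, hmem q hqp]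
  | case2 a h =>
    rw [stripA, dif_neg h]
    have hnd : ¬ i ∣ a := by
      intro hdvd
      exact h ⟨(PySem.Int.mod_eq_zero_iff_dvd a i).mpr hdvd, by rw [hip]; exact_mod_cast hp.two_le, ha⟩
    have : p ∉ PF a := by
      rw [pf_mem]; rintro ⟨-, hdvd, -⟩; exact hnd (hip ▸ hdvd)
    rw [Finset.sdiff_eq_self_iff_disjoint.mpr (by simpa using this)]

theorem loopA_char (fuel : Nat) :
    ∀ (a b i flag : Int), 2 ≤ i → a ≠ 0 → b ≠ 0 →
    (1 < a → i ≤ a) → (1 < b → i ≤ b) →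
    a < i + fuel → b < i + fuel →
    (∀ j : Int, 2 ≤ j → j < i → ¬ j ∣ a) →
    (∀ j : Int, 2 ≤ j → j < i → ¬ j ∣ b) →
    loopA fuel a b i flag =
      decide (flag + (if 1 < a ∨ 1 < b then ((PF a ∩ PF b).card : Int) else 0) = 1) := by
  induction fuel with
  | zero =>
    intro a b i flag h2 ha hb hia hib hfa hfb _ _
    have hna : ¬ 1 < a := fun h => by have := hia h; omega
    have hnb : ¬ 1 < b := fun h => by have := hib h; omega
    rw [loopA, if_neg (by tauto), add_zero]
    rcases eq_or_ne flag 1 with rfl | hne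
    · simp
    · simp [hne]
  | succ fuel ih =>
    intro a b i flag h2 ha hb hia hib hfa hfb inva invb
    rw [loopA]
    by_cases hc : 1 < a ∨ 1 < b
    · rw [if_pos hc, if_pos hc]
      have hip : i = ((i.toNat : ℕ) : Int) := by omega
      set p := i.toNat with hpdef
      have inva' : ∀ j : Int, 2 ≤ j → j < i + 1 → ¬ j ∣ stripA a i := by
        intro j hj hji hdvd
        rcases lt_or_ge j i with hlt | hge
        · exact inva j hj hlt (hdvd.trans (stripA_dvd a i))
        · have hji' : j = i := by omega
          exact stripA_not_dvd a i ha h2 (hji' ▸ hdvd)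
      have invb' : ∀ j : Int, 2 ≤ j → j < i + 1 → ¬ j ∣ stripA b i := by
        intro j hj hji hdvd
        rcases lt_or_ge j i with hlt | hge
        · exact invb j hj hlt (hdvd.trans (stripA_dvd b i))
        · have hji' : j = i := by omega
          exact stripA_not_dvd b i hb h2 (hji' ▸ hdvd)
      have ha' : stripA a i ≠ 0 := stripA_ne_zero a i ha
      have hb' : stripA b i ≠ 0 := stripA_ne_zero b i hb
      have hia' : 1 < stripA a i → i + 1 ≤ stripA a i := by
        intro h1; by_contra hle; push_neg at hle
        exact inva' (stripA a i) (by omega) (by omega) dvd_rfl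
      have hib' : 1 < stripA b i → i + 1 ≤ stripA b i := by
        intro h1; by_contra hle; push_neg at hle
        exact invb' (stripA b i) (by omega) (by omega) dvd_rfl
      have hfa' : stripA a i < (i + 1) + fuel := by
        rcases lt_trichotomy a 0 with hneg | h0 | hpos
        · have := stripA_neg a i h2 hneg; omega
        · exact absurd h0 ha
        · have h1 : stripA a i ≤ a := Int.le_of_dvd hpos (stripA_dvd a i); omega
      have hfb' : stripA b i < (i + 1) + fuel := by
        rcases lt_trichotomy b 0 with hneg | h0 | hpos
        · have := stripA_neg b i h2 hneg; omega
        · exact absurd h0 hb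
        · have h1 : stripA b i ≤ b := Int.le_of_dvd hpos (stripA_dvd b i); omega
      rw [ih (stripA a i) (stripA b i) (i + 1) _ (by omega) ha' hb' hia' hib' hfa' hfb' inva' invb']
      have hC' : (if 1 < stripA a i ∨ 1 < stripA b i
            then ((PF (stripA a i) ∩ PF (stripA b i)).card : Int) else 0)
          = ((PF (stripA a i) ∩ PF (stripA b i)).card : Int) := by
        by_cases hc2 : 1 < stripA a i ∨ 1 < stripA b i
        · rw [if_pos hc2]
        · rw [if_neg hc2]
          push_neg at hc2
          have hEmpty : PF (stripA a i) ∩ PF (stripA b i) = ∅ := by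
            rcases hc with h1 | h1
            · have hpos := stripA_pos a i (by omega : 0 < a)
              have heq : stripA a i = 1 := by omega
              rw [heq]
              have hone : PF 1 = ∅ := by simp [PF]
              rw [hone, Finset.empty_inter]
            · have hpos := stripA_pos b i (by omega : 0 < b)
              have heq : stripA b i = 1 := by omega
              rw [heq]
              have hone : PF 1 = ∅ := by simp [PF]
              rw [hone, Finset.inter_empty]
          rw [hEmpty]
          simp
      rw [hC']
      by_cases hprime : p.Prime
      · have hpfa : PF (stripA a i) = PF a \ {p} := stripA_pf a i p hip hprime ha
        have hpfb : PF (stripA b i) = PF b \ {p} := stripA_pf b i p hip hprime hb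
        have hinter : PF (stripA a i) ∩ PF (stripA b i) = (PF a ∩ PF b).erase p := by
          rw [hpfa, hpfb]
          ext q
          simp only [Finset.mem_inter, Finset.mem_sdiff, Finset.mem_erase, Finset.mem_singleton]
          tauto
        rw [hinter]
        by_cases hdd : PySem.Int.mod a i = 0 ∧ PySem.Int.mod b i = 0
        · rw [if_pos hdd]
          have hpa : p ∈ PF a :=
            (pf_mem a p).mpr ⟨hprime, hip ▸ (PySem.Int.mod_eq_zero_iff_dvd a i).mp hdd.1, ha⟩
          have hpb : p ∈ PF b :=
            (pf_mem b p).mpr ⟨hprime, hip ▸ (PySem.Int.mod_eq_zero_iff_dvd b i).mp hdd.2, hb⟩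
          have hpm : p ∈ PF a ∩ PF b := Finset.mem_inter.mpr ⟨hpa, hpb⟩
          have hpos : 0 < (PF a ∩ PF b).card := Finset.card_pos.mpr ⟨p, hpm⟩
          rw [Finset.card_erase_of_mem hpm, decide_eq_decide]
          omega
        · rw [if_neg hdd]
          have hnm : p ∉ PF a ∩ PF b := by
            intro hm
            have hma := Finset.mem_inter.mp hm
            exact hdd ⟨(PySem.Int.mod_eq_zero_iff_dvd a i).mpr (hip ▸ ((pf_mem a p).mp hma.1).2.1),
              (PySem.Int.mod_eq_zero_iff_dvd b i).mpr (hip ▸ ((pf_mem b p).mp hma.2).2.1)⟩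
          rw [Finset.erase_eq_self.mpr hnm]
      · have hge2 : 2 ≤ p := by omega
        have hndva : ¬ i ∣ a := by
          intro hdvd
          have h1 : p ∣ a.natAbs := Int.ofNat_dvd_left.mp (hip ▸ hdvd)
          obtain ⟨q, hq, hqdvd⟩ := Nat.exists_prime_and_dvd (n := p) (by omega)
          have hqlt : q < p := by
            rcases lt_or_eq_of_le (Nat.le_of_dvd (by omega) hqdvd) with hl | hl
            · exact hl
            · exact absurd (hl ▸ hq) hprime
          exact inva (q : Int) (by exact_mod_cast hq.two_le)
            (by rw [hip]; exact_mod_cast hqlt)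
            (Int.ofNat_dvd_left.mpr (hqdvd.trans h1))
        have hndvb : ¬ i ∣ b := by
          intro hdvd
          have h1 : p ∣ b.natAbs := Int.ofNat_dvd_left.mp (hip ▸ hdvd)
          obtain ⟨q, hq, hqdvd⟩ := Nat.exists_prime_and_dvd (n := p) (by omega)
          have hqlt : q < p := by
            rcases lt_or_eq_of_le (Nat.le_of_dvd (by omega) hqdvd) with hl | hl
            · exact hl
            · exact absurd (hl ▸ hq) hprime
          exact invb (q : Int) (by exact_mod_cast hq.two_le)
            (by rw [hip]; exact_mod_cast hqlt)
            (Int.ofNat_dvd_left.mpr (hqdvd.trans h1))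
        have hmod : ¬ (PySem.Int.mod a i = 0 ∧ PySem.Int.mod b i = 0) := by
          intro hx
          exact hndva ((PySem.Int.mod_eq_zero_iff_dvd a i).mp hx.1)
        rw [if_neg hmod, stripA_of_not_dvd a i hndva, stripA_of_not_dvd b i hndvb]
    · rw [if_neg hc, if_neg hc, add_zero]
      rcases eq_or_ne flag 1 with rfl | hne
      · simp
      · simp [hne]

theorem pvNodupAdd (fs : PySem.Set Int) (x : Int) (h : fs.Nodup) : (fs.add x).Nodup := by
  unfold PySem.Set.add
  split
  · exact h
  · rename_i hc
    refine List.Nodup.append h (List.nodup_singleton x) ?_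
    intro y hy hz
    simp only [List.mem_singleton] at hz
    subst hz
    exact absurd (List.contains_iff_mem.mpr hy) (by simpa using hc)

theorem pvMinPrime (n d : Int) (hd : 2 ≤ d) (hdvd : d ∣ n) (hn : 1 ≤ n)
    (hinv : ∀ j : Int, 2 ≤ j → j < d → ¬ j ∣ n) : d.toNat.Prime := by
  by_contra hnp
  obtain ⟨q, hq, hqd⟩ := Nat.exists_prime_and_dvd (n := d.toNat) (by omega)
  have hqlt : q < d.toNat := by
    rcases lt_or_eq_of_le (Nat.le_of_dvd (by omega) hqd) with hl | hl
    · exact hl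
    · exact absurd (hl ▸ hq) hnp
  have hqdz : (q : Int) ∣ d := by
    have hcast : ((d.toNat : ℕ) : Int) = d := by omega
    exact hcast ▸ Int.natCast_dvd_natCast.mpr hqd
  exact hinv (q : Int) (by exact_mod_cast hq.two_le) (by omega) (hqdz.trans hdvd)

theorem trialB_char (n d : Int) (fs : PySem.Set Int) (hd : 2 ≤ d) (hn : 1 ≤ n)
    (hinv : ∀ j : Int, 2 ≤ j → j < d → ¬ j ∣ n) (hfs : fs.Nodup) :
    (trialB n d fs).Nodup ∧
      (∀ x : Int, x ∈ trialB n d fs ↔ x ∈ fs ∨ ∃ p ∈ PF n, x = (p : Int)) := by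
  induction n, d, fs using trialB.induct with
  | case1 n d fs hgd hm ih =>
    rw [trialB, dif_pos hgd, dif_pos hm]
    have hdvd : d ∣ n := (PySem.Int.mod_eq_zero_iff_dvd n d).mp hm
    have hdp : d.toNat.Prime := pvMinPrime n d hgd.2 hdvd hn hinv
    have hstrip_eq := stripB_eq_stripA n d
    have hn' : 1 ≤ stripB n d := by
      rw [hstrip_eq]; exact stripA_pos n d (by omega)
    have hinv' : ∀ j : Int, 2 ≤ j → j < d → ¬ j ∣ stripB n d := by
      intro j hj hjd hdv
      exact hinv j hj hjd (hdv.trans (hstrip_eq ▸ stripA_dvd n d))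
    obtain ⟨ihn, ihm⟩ := ih hgd.2 hn' hinv' (pvNodupAdd fs d hfs)
    refine ⟨ihn, fun x => ?_⟩
    rw [ihm x]
    have hpfn : PF (stripB n d) = PF n \ {d.toNat} := by
      rw [hstrip_eq]
      exact stripA_pf n d d.toNat (by omega) hdp (by omega)
    have hdpf : d.toNat ∈ PF n :=
      (pf_mem n d.toNat).mpr
        ⟨hdp, by rw [show ((d.toNat : ℕ) : Int) = d from by omega]; exact hdvd, by omega⟩
    rw [PySem.Set.mem_add, hpfn]
    constructor
    · rintro ((hx | hxd) | ⟨p, hp, rfl⟩)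
      · exact Or.inl hx
      · exact Or.inr ⟨d.toNat, hdpf, by omega⟩
      · exact Or.inr ⟨p, (Finset.mem_sdiff.mp hp).1, rfl⟩
    · rintro (hx | ⟨p, hp, rfl⟩)
      · exact Or.inl (Or.inl hx)
      · by_cases hpd : p = d.toNat
        · exact Or.inl (Or.inr (by omega))
        · exact Or.inr ⟨p, Finset.mem_sdiff.mpr ⟨hp, by simpa using hpd⟩, rfl⟩
  | case2 n d fs hgd hm ih =>
    rw [trialB, dif_pos hgd, dif_neg hm]
    have hinv' : ∀ j : Int, 2 ≤ j → j < d + 1 → ¬ j ∣ n := by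
      intro j hj hjd hdv
      rcases lt_or_ge j d with hlt | hge
      · exact hinv j hj hlt hdv
      · have : j = d := by omega
        subst this
        exact hm ((PySem.Int.mod_eq_zero_iff_dvd n j).mpr hdv)
    exact ih (by omega) hn hinv' hfs
  | case3 n d fs hgd h1 =>
    rw [trialB, dif_neg hgd, if_pos h1]
    have hsq : n < d * d := by
      rcases not_and_or.mp hgd with h | h
      · omega
      · exact absurd hd h
    have hprime : n.toNat.Prime := by
      by_contra hnp
      have h2n : 2 ≤ n.toNat := by omega
      have hmf := Nat.minFac_sq_le_self (by omega : 0 < n.toNat) hnp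
      have hmfp := Nat.minFac_prime (by omega : n.toNat ≠ 1)
      have hmfd : ((n.toNat.minFac : ℕ) : Int) ∣ n := by
        have : ((n.toNat.minFac : ℕ) : Int) ∣ ((n.toNat : ℕ) : Int) :=
          Int.natCast_dvd_natCast.mpr (Nat.minFac_dvd _)
        rwa [show ((n.toNat : ℕ) : Int) = n from by omega] at this
      have hmZ : ((n.toNat.minFac : ℕ) : Int) * ((n.toNat.minFac : ℕ) : Int) ≤ n := by
        calc ((n.toNat.minFac : ℕ) : Int) * ((n.toNat.minFac : ℕ) : Int)
            = ((n.toNat.minFac * n.toNat.minFac : ℕ) : Int) := by push_cast; ring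
          _ ≤ ((n.toNat : ℕ) : Int) := by exact_mod_cast (by rw [← pow_two]; exact hmf)
          _ = n := by omega
      have hlt : ((n.toNat.minFac : ℕ) : Int) < d := by
        by_contra hge
        push_neg at hge
        have hdd : d * d ≤ ((n.toNat.minFac : ℕ) : Int) * ((n.toNat.minFac : ℕ) : Int) :=
          mul_le_mul hge hge (by omega) (by positivity)
        omega
      exact hinv _ (by exact_mod_cast hmfp.two_le) hlt hmfd
    have hpfn : PF n = {n.toNat} := by
      unfold PF
      rw [(show n.natAbs = n.toNat from by omega)]
      exact hprime.primeFactors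
    refine ⟨pvNodupAdd fs n hfs, fun x => ?_⟩
    rw [PySem.Set.mem_add, hpfn]
    constructor
    · rintro (hx | hxn)
      · exact Or.inl hx
      · exact Or.inr ⟨n.toNat, Finset.mem_singleton_self _, by omega⟩
    · rintro (hx | ⟨p, hp, rfl⟩)
      · exact Or.inl hx
      · rw [Finset.mem_singleton] at hp
        exact Or.inr (by omega)
  | case4 n d fs hgd h1 =>
    rw [trialB, dif_neg hgd, if_neg h1]
    have hn1 : n = 1 := by omega
    refine ⟨hfs, fun x => ?_⟩
    subst hn1
    have : PF 1 = ∅ := by simp [PF]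
    rw [this]
    simp

theorem pf_abs (a : Int) : PF |a| = PF a := by
  unfold PF
  rw [Int.natAbs_abs]

theorem alt_count (a b : Int) (ha : a ≠ 0) (hb : b ≠ 0) :
    PySem.Set.len
        (PySem.Set.inter (trialB |a| 2 PySem.Set.empty) (trialB |b| 2 PySem.Set.empty))
      = ((PF a ∩ PF b).card : Int) := by
  obtain ⟨hnd1, hm1⟩ := trialB_char |a| 2 PySem.Set.empty (le_refl 2)
    (by rw [Int.abs_eq_natAbs]; omega) (by intro j hj hjd hdv; omega) List.nodup_nil
  obtain ⟨hnd2, hm2⟩ := trialB_char |b| 2 PySem.Set.empty (le_refl 2)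
    (by rw [Int.abs_eq_natAbs]; omega) (by intro j hj hjd hdv; omega) List.nodup_nil
  unfold PySem.Set.inter PySem.Set.len
  rw [← List.toFinset_card_of_nodup
    (hnd1.filter (fun x => (trialB |b| 2 PySem.Set.empty).contains x))]
  have hto : (List.filter (fun x => (trialB |b| 2 PySem.Set.empty).contains x)
        (trialB |a| 2 PySem.Set.empty)).toFinset
      = (PF a ∩ PF b).image (fun p : ℕ => (p : Int)) := by
    ext x
    simp only [List.mem_toFinset, List.mem_filter, Finset.mem_image, Finset.mem_inter]
    rw [PySem.Set.contains_iff, hm1 x, hm2 x]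
    rw [pf_abs, pf_abs]
    constructor
    · rintro ⟨hx1 | ⟨p, hp, rfl⟩, hx2⟩
      · exact absurd hx1 (List.not_mem_nil)
      · rcases hx2 with hx2 | ⟨q, hq, hqe⟩
        · exact absurd hx2 (List.not_mem_nil)
        · have : q = p := by omega
          subst this
          exact ⟨q, ⟨hp, hq⟩, rfl⟩
    · rintro ⟨p, ⟨hp1, hp2⟩, rfl⟩
      exact ⟨Or.inr ⟨p, hp1, rfl⟩, Or.inr ⟨p, hp2, rfl⟩⟩
  rw [hto, Finset.card_image_of_injective _ (fun x y h => by exact_mod_cast h)]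

-- ===== VERDICT (by name: the statement is the Claim_ definition above) =====
theorem wspolne_spec : Claim_equal_wspolne := by
  intro a b _ hpre
  unfold Spec_wspolne wspolne wspolne_alt
  by_cases hle : a ≤ 1 ∧ b ≤ 1
  · rw [if_pos hle,
      show a.natAbs + b.natAbs + 2 = (a.natAbs + b.natAbs + 1) + 1 from rfl,
      loopA, if_neg (by omega : ¬ (1 < a ∨ 1 < b))]
    rfl
  · rw [if_neg hle]
    have hc : 1 < a ∨ 1 < b := by omega
    have ha : a ≠ 0 := by
      intro h0
      rcases hc with h | h
      · omega
      · exact absurd h (by simpa using hpre.1 h0)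
    have hb : b ≠ 0 := by
      intro h0
      rcases hc with h | h
      · exact absurd h (by simpa using hpre.2 h0)
      · omega
    rw [loopA_char (a.natAbs + b.natAbs + 2) a b 2 0 (le_refl 2) ha hb
      (by omega) (by omega) (by omega) (by omega)
      (by intro j hj hjd hdv; omega) (by intro j hj hjd hdv; omega)]
    rw [if_pos hc, alt_count a b ha hb, zero_add]
    rcases eq_or_ne (((PF a ∩ PF b).card : Int)) 1 with hq | hq
    · rw [hq]; simp
    · simp [hq]
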